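-- pv_equiv track=rewrite | github.com/maiziezhoulab/VolcanoSV | bin/VolcanoSV-asm/count_kmer_v1.py | reduce_kcs
-- ===== SOURCE A (Python) =====
-- def reduce_kcs(kcs,hps):
--     kc = kcs[0]
--     dc = {hps[0]:kc}
--     for i in range(1,len(kcs)):
--         hp = hps[i]
--         kcnew = kcs[i]
--         if hp in dc:
--             kc = dc[hp]
--             for k in kcnew:
--                 if k in kc:
--                     kc[k]+=kcnew[k]
--                 else:
--                     kc[k] = kcnew[k]
--         else:
--             dc[hp] = kcnew
--     return dc
-- ===== SOURCE B (Python) =====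
-- def reduce_kcs(kcs, hps):
--     # Two-pass decomposition: group the dicts by haplotype key first, then merge each
--     # group into its first dict.  (Like A, merging mutates the first dict of a group
--     # in place; the first dict of the first group is kcs[0], as in A.)
--     groups = {}
--     for hp, kc in zip(hps, kcs):
--         groups[hp] = groups.get(hp, []) + [kc]
--     dc = {}
--     for hp, ds in groups.items():
--         base = ds[0]
--         for d in ds[1:]:
--             for k, v in d.items():
--                 base[k] = base.get(k, 0) + v
--         dc[hp] = base
--     return dc
-- ===== Notes on version B (the rewrite author's own statement) =====
-- stated objective: alternative
-- what changed: A merges incrementally in one indexed pass over kcs, updating dc[hp] as it goes; B first groups the dicts by haplotype key in one pass over zip(hps,kcs), then merges each group's dicts into the group's first dict in a second pass.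
import Mathlib
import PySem

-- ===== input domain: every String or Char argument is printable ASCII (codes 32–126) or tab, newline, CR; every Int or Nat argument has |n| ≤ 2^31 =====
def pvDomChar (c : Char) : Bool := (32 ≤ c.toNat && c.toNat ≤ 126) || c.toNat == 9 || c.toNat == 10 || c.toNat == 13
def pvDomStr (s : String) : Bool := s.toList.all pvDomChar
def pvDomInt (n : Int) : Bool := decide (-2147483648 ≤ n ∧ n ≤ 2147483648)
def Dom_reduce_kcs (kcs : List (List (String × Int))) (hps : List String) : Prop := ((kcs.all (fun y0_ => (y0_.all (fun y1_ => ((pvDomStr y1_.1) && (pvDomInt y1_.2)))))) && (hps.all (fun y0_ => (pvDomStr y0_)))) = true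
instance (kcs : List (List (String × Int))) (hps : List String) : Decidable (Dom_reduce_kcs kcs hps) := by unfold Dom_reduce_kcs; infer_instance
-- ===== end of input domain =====

-- B regroups the work: one pass groups the kmer-count dicts by haplotype key, a second
-- pass merges each group into its first dict (same return value; like A, the Python B
-- mutates the first dict of each group in place — the equivalence here is about the
-- return value only).

-- ===== PORT A =====
-- inner merge loop of A: 'for k in kcnew: if k in kc: kc[k]+=kcnew[k] else: kc[k]=kcnew[k]'
def pvMergeA (kc kcnew : PySem.Dict String Int) : PySem.Dict String Int :=
  kcnew.keys.foldl (fun kc k =>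
    if kc.contains k then kc.insert k (kc.getD k 0 + kcnew.getD k 0)
    else kc.insert k (kcnew.getD k 0)) kc

def reduce_kcs (kcs : List (List (String × Int))) (hps : List String) :
    List (String × List (String × Int)) :=
  ((PySem.List.pyRange 1 (PySem.List.len kcs) 1).foldl (fun dc i =>
      if dc.contains (PySem.List.pyGetD hps i "") then
        dc.insert (PySem.List.pyGetD hps i "")
          (pvMergeA (dc.getD (PySem.List.pyGetD hps i "") PySem.Dict.empty)
            (PySem.Dict.ofList (PySem.List.pyGetD kcs i [])))
      else
        dc.insert (PySem.List.pyGetD hps i "")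
          (PySem.Dict.ofList (PySem.List.pyGetD kcs i [])))
    (PySem.Dict.empty.insert (PySem.List.pyGetD hps 0 "")
      (PySem.Dict.ofList (PySem.List.pyGetD kcs 0 [])))).items.map
    (fun p => (p.1, p.2.items))

-- ===== PORT B =====
-- inner merge loop of B: 'for k, v in d.items(): base[k] = base.get(k, 0) + v'
def pvMergeB (base d : PySem.Dict String Int) : PySem.Dict String Int :=
  d.items.foldl (fun b p => b.insert p.1 (b.getD p.1 0 + p.2)) base

def reduce_kcs_alt (kcs : List (List (String × Int))) (hps : List String) :
    List (String × List (String × Int)) :=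
  (((hps.zip kcs).foldl (fun g p =>
        g.insert p.1 (g.getD p.1 [] ++ [PySem.Dict.ofList p.2]))
      (PySem.Dict.empty : PySem.Dict String (List (PySem.Dict String Int)))).items.foldl
    (fun dc p =>
      dc.insert p.1 ((p.2.drop 1).foldl pvMergeB (p.2.headD PySem.Dict.empty)))
    (PySem.Dict.empty : PySem.Dict String (PySem.Dict String Int))).items.map
    (fun p => (p.1, p.2.items))

-- ===== PRECONDITION & SPEC =====
-- Pre_ excludes exactly the inputs where A raises IndexError: empty kcs (kcs[0]) and
-- hps shorter than kcs (hps[i] inside the loop).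
def Pre_reduce_kcs (kcs : List (List (String × Int))) (hps : List String) : Prop :=
  kcs ≠ [] ∧ kcs.length ≤ hps.length
instance (kcs : List (List (String × Int))) (hps : List String) : Decidable (Pre_reduce_kcs kcs hps) := by unfold Pre_reduce_kcs; infer_instance

def pvWitness_reduce_kcs : (List (List (String × Int))) × List String :=
  ([[("a", 1)], [("a", 2), ("b", 3)], [("c", 4)]], ["h1", "h2", "h1"])

def Spec_reduce_kcs (kcs : List (List (String × Int))) (hps : List String) (out : List (String × List (String × Int))) : Prop := out = reduce_kcs_alt kcs hps
instance (kcs : List (List (String × Int))) (hps : List String) (out : List (String × List (String × Int))) : Decidable (Spec_reduce_kcs kcs hps out) := by unfold Spec_reduce_kcs; infer_instance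

-- ===== CLAIM (what is proved, stated in full; the proofs are below) =====
def Claim_equal_reduce_kcs : Prop := ∀ (kcs : List (List (String × Int))) (hps : List String), Dom_reduce_kcs kcs hps → Pre_reduce_kcs kcs hps → Spec_reduce_kcs kcs hps (reduce_kcs kcs hps)

-- ===== LEMMAS AND PROOFS =====

-- proof-side names for the two fold bodies and grouping
def pvStep (dc : PySem.Dict String (PySem.Dict String Int))
    (p : String × PySem.Dict String Int) : PySem.Dict String (PySem.Dict String Int) :=
  if dc.contains p.1 then dc.insert p.1 (pvMergeA (dc.getD p.1 PySem.Dict.empty) p.2)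
  else dc.insert p.1 p.2

def pvGStep (g : PySem.Dict String (List (PySem.Dict String Int)))
    (p : String × PySem.Dict String Int) : PySem.Dict String (List (PySem.Dict String Int)) :=
  g.insert p.1 (g.getD p.1 [] ++ [p.2])

def pvMAll (ds : List (PySem.Dict String Int)) : PySem.Dict String Int :=
  (ds.drop 1).foldl pvMergeB (ds.headD PySem.Dict.empty)

def pvRender (g : PySem.Dict String (List (PySem.Dict String Int))) :
    PySem.Dict String (PySem.Dict String Int) :=
  PySem.Dict.mk (g.items.map (fun p => (p.1, pvMAll p.2)))

theorem pvMergeA_eq_mergeB (kc kcnew : PySem.Dict String Int)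
    (h : kcnew.keys.Nodup) : pvMergeA kc kcnew = pvMergeB kc kcnew := by
  unfold pvMergeA pvMergeB
  have hk : kcnew.keys = kcnew.items.map (fun p => p.1) := rfl
  rw [hk, List.foldl_map]
  apply PySem.List.foldl_congr_mem'
  intro p hp b
  have hv : kcnew.getD p.1 0 = p.2 := by
    rcases p with ⟨k, v⟩
    exact PySem.Dict.getD_of_mem_items _ hp h 0
  by_cases hc : b.contains p.1
  · simp [hc, hv]
  · simp [hc, hv, PySem.Dict.getD_of_not_contains b 0 (by simpa using hc)]

theorem pvRender_get? (g : PySem.Dict String (List (PySem.Dict String Int))) (k : String) :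
    (pvRender g).get? k = (g.get? k).map pvMAll := by
  rcases g with ⟨l⟩
  induction l with
  | nil => rfl
  | cons q rest ih =>
    rcases q with ⟨k', ds⟩
    simp only [pvRender, List.map_cons, PySem.Dict.get?_mk_cons]
    by_cases he : k' == k
    · simp [he]
    · simpa [he] using ih

theorem pvRender_keys (g : PySem.Dict String (List (PySem.Dict String Int))) :
    (pvRender g).keys = g.keys := by
  show (pvRender g).items.map (fun p => p.1) = g.items.map (fun p => p.1)
  simp [pvRender]

theorem pvRender_contains (g : PySem.Dict String (List (PySem.Dict String Int))) (k : String) :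
    (pvRender g).contains k = g.contains k := by
  rw [PySem.Dict.contains_eq_decide_mem_keys, PySem.Dict.contains_eq_decide_mem_keys,
    pvRender_keys]

theorem pvMAll_append (ds : List (PySem.Dict String Int)) (d : PySem.Dict String Int)
    (h : ds ≠ []) : pvMAll (ds ++ [d]) = pvMergeB (pvMAll ds) d := by
  rcases ds with _ | ⟨d0, dt⟩
  · exact absurd rfl h
  · simp [pvMAll, List.foldl_append]

theorem pvStep_render (g : PySem.Dict String (List (PySem.Dict String Int)))
    (p : String × PySem.Dict String Int)
    (hne : ∀ k ds, g.get? k = some ds → ds ≠ [])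
    (hp2 : p.2.keys.Nodup) :
    pvStep (pvRender g) p = pvRender (pvGStep g p) := by
  by_cases hc : g.contains p.1
  · obtain ⟨ds, hds⟩ : ∃ ds, g.get? p.1 = some ds := by
      have := PySem.Dict.contains_eq_isSome_get? (d := g) (k := p.1)
      rw [hc] at this
      exact Option.isSome_iff_exists.mp this.symm
    have hdsne : ds ≠ [] := hne _ _ hds
    have hgd : g.getD p.1 [] = ds := PySem.Dict.getD_of_get?_eq_some _ _ hds
    have hrd : (pvRender g).getD p.1 PySem.Dict.empty = pvMAll ds := by
      rw [PySem.Dict.getD_eq_get?_getD, pvRender_get?, hds]; rfl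
    have hrc : (pvRender g).contains p.1 = true := by rw [pvRender_contains]; exact hc
    unfold pvStep pvGStep
    rw [if_pos hrc, hrd, hgd,
      pvMergeA_eq_mergeB _ _ hp2]
    apply PySem.Dict.ext
    rw [PySem.Dict.items_insert_of_contains _ _ hrc]
    show (pvRender g).items.map _ = (pvRender (g.insert p.1 (ds ++ [p.2]))).items
    have : (pvRender (g.insert p.1 (ds ++ [p.2]))).items
        = (g.insert p.1 (ds ++ [p.2])).items.map (fun q => (q.1, pvMAll q.2)) := rfl
    rw [this, PySem.Dict.items_insert_of_contains _ _ hc]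
    show ((g.items.map (fun q => (q.1, pvMAll q.2))).map _) = _
    rw [List.map_map, List.map_map]
    refine List.map_congr_left ?_
    intro q _
    by_cases he : q.1 == p.1
    · simp [Function.comp, he, pvMAll_append ds p.2 hdsne]
    · simp [Function.comp, he]
  · have hrc : (pvRender g).contains p.1 = false := by rw [pvRender_contains]; simpa using hc
    have hgd : g.getD p.1 [] = [] :=
      PySem.Dict.getD_of_not_contains _ _ (by simpa using hc)
    unfold pvStep pvGStep
    rw [if_neg (by simp [hrc]), hgd]
    apply PySem.Dict.ext
    rw [PySem.Dict.items_insert_of_not_contains _ _ hrc]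
    have : (pvRender (g.insert p.1 ([] ++ [p.2]))).items
        = (g.insert p.1 ([] ++ [p.2])).items.map (fun q => (q.1, pvMAll q.2)) := rfl
    rw [this, PySem.Dict.items_insert_of_not_contains _ _ (by simpa using hc)]
    simp [pvRender, pvMAll]

theorem pvGStep_nonempty (g : PySem.Dict String (List (PySem.Dict String Int)))
    (p : String × PySem.Dict String Int)
    (hne : ∀ k ds, g.get? k = some ds → ds ≠ []) :
    ∀ k ds, (pvGStep g p).get? k = some ds → ds ≠ [] := by
  intro k ds h
  unfold pvGStep at h
  rw [PySem.Dict.get?_insert] at h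
  by_cases he : k = p.1
  · rw [if_pos he] at h
    cases h
    simp
  · rw [if_neg he] at h
    exact hne _ _ h

theorem pvFoldRender (L : List (String × PySem.Dict String Int)) :
    ∀ (g : PySem.Dict String (List (PySem.Dict String Int))),
      (∀ k ds, g.get? k = some ds → ds ≠ []) →
      (∀ p ∈ L, p.2.keys.Nodup) →
      L.foldl pvStep (pvRender g) = pvRender (L.foldl pvGStep g) := by
  induction L with
  | nil => intro g _ _; rfl
  | cons p rest ih =>
    intro g hne hnd
    simp only [List.foldl_cons]
    rw [pvStep_render g p hne (hnd p (by simp)),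
      ih (pvGStep g p) (pvGStep_nonempty g p hne) (fun q hq => hnd q (by simp [hq]))]

-- A's indexed loop over 1..len(kcs) is the fold of pvStep over the paired tail
theorem pvLoopA (kcs : List (List (String × Int))) (hps : List String)
    (hlen : kcs.length ≤ hps.length) :
    ∀ (a : Nat) (dc : PySem.Dict String (PySem.Dict String Int)),
      (PySem.List.pyRange (a : Int) (PySem.List.len kcs) 1).foldl (fun dc i =>
        if dc.contains (PySem.List.pyGetD hps i "") then
          dc.insert (PySem.List.pyGetD hps i "")
            (pvMergeA (dc.getD (PySem.List.pyGetD hps i "") PySem.Dict.empty)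
              (PySem.Dict.ofList (PySem.List.pyGetD kcs i [])))
        else
          dc.insert (PySem.List.pyGetD hps i "")
            (PySem.Dict.ofList (PySem.List.pyGetD kcs i []))) dc
      = (((hps.zip kcs).map (fun q => (q.1, PySem.Dict.ofList q.2))).drop a).foldl pvStep dc := by
  intro a
  induction h : kcs.length - a generalizing a with
  | zero =>
    intro dc
    have ha : kcs.length ≤ a := by omega
    rw [PySem.List.pyRange_one_eq_nil (by simp [PySem.List.len]; exact_mod_cast ha),
      List.drop_eq_nil_of_le (by simp [List.length_zip]; omega)]
    rfl
  | succ n ih =>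
    intro dc
    have ha : a < kcs.length := by omega
    have hcons : (PySem.List.pyRange (a : Int) (PySem.List.len kcs) 1)
        = (a : Int) :: PySem.List.pyRange ((a : Int) + 1) (PySem.List.len kcs) 1 :=
      PySem.List.pyRange_one_cons (by simp [PySem.List.len]; exact_mod_cast ha)
    have hzlen : a < (hps.zip kcs).length := by simp [List.length_zip]; omega
    have hdrop : (((hps.zip kcs).map (fun q => (q.1, PySem.Dict.ofList q.2))).drop a)
        = (hps[a]'(by omega), PySem.Dict.ofList (kcs[a]'ha))
          :: (((hps.zip kcs).map (fun q => (q.1, PySem.Dict.ofList q.2))).drop (a + 1)) := by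
      rw [List.drop_eq_getElem_cons (by simpa using hzlen)]
      congr 1
      simp [List.getElem_zip]
    rw [hcons, hdrop]
    simp only [List.foldl_cons]
    have hcast : ((a : Int) + 1) = ((a + 1 : Nat) : Int) := by push_cast; ring
    rw [hcast, ih (a + 1) (by omega)]
    congr 1
    simp only [PySem.List.pyGetD_natCast, pvStep]
    rw [List.getD_eq_getElem _ _ (by omega), List.getD_eq_getElem _ _ ha]

theorem pvAlt_eq_render (kcs : List (List (String × Int))) (hps : List String) :
    reduce_kcs_alt kcs hps
      = (pvRender (((hps.zip kcs).map (fun q => (q.1, PySem.Dict.ofList q.2))).foldl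
          pvGStep PySem.Dict.empty)).items.map (fun p => (p.1, p.2.items)) := by
  unfold reduce_kcs_alt
  have hgroups : (hps.zip kcs).foldl (fun g p =>
      g.insert p.1 (g.getD p.1 [] ++ [PySem.Dict.ofList p.2])) PySem.Dict.empty
      = ((hps.zip kcs).map (fun q => (q.1, PySem.Dict.ofList q.2))).foldl
          pvGStep PySem.Dict.empty := by
    rw [List.foldl_map]
    rfl
  rw [hgroups]
  set g := ((hps.zip kcs).map (fun q => (q.1, PySem.Dict.ofList q.2))).foldl
    pvGStep PySem.Dict.empty with hg
  have hnd : g.keys.Nodup := by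
    rw [hg]
    exact PySem.Dict.nodup_keys_foldl_insert_key
      ((hps.zip kcs).map (fun q => (q.1, PySem.Dict.ofList q.2)))
      (fun (p : String × PySem.Dict String Int) => p.1)
      (fun g (p : String × PySem.Dict String Int) => g.getD p.1 [] ++ [p.2])
      (PySem.Dict.empty : PySem.Dict String (List (PySem.Dict String Int)))
      PySem.Dict.nodup_keys_empty
  have hitems : (g.items.foldl (fun dc p =>
      dc.insert p.1 ((p.2.drop 1).foldl pvMergeB (p.2.headD PySem.Dict.empty)))
      (PySem.Dict.empty : PySem.Dict String (PySem.Dict String Int))).items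
      = g.items.map (fun p => (p.1, pvMAll p.2)) := by
    have := PySem.Dict.items_foldl_insert_fresh (l := g.items)
      (k := fun p => p.1) (v := fun p => pvMAll p.2)
      (d := (PySem.Dict.empty : PySem.Dict String (PySem.Dict String Int)))
      (by intro a _; simp) (by simpa using hnd)
    simpa [pvMAll] using this
  rw [hitems]
  rfl

-- ===== VERDICT (by name: the statement is the Claim_ definition above) =====
theorem reduce_kcs_spec : Claim_equal_reduce_kcs := by
  intro kcs hps _ hpre
  obtain ⟨hkne, hlen⟩ := hpre
  show reduce_kcs kcs hps = reduce_kcs_alt kcs hps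
  rcases kcs with _ | ⟨kc0, kcrest⟩
  · exact absurd rfl hkne
  rcases hps with _ | ⟨hp0, hprest⟩
  · simp at hlen
  unfold reduce_kcs
  have h1 := pvLoopA (kc0 :: kcrest) (hp0 :: hprest) hlen 1
  simp only [Nat.cast_one] at h1
  rw [h1]
  rw [pvAlt_eq_render]
  congr 1
  have hpairs : ((hp0 :: hprest).zip (kc0 :: kcrest)).map
      (fun q => (q.1, PySem.Dict.ofList q.2))
      = (hp0, PySem.Dict.ofList kc0)
        :: ((hprest.zip kcrest).map (fun q => (q.1, PySem.Dict.ofList q.2))) := by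
    simp [List.zip]
  have hstep0 : (PySem.Dict.empty.insert (PySem.List.pyGetD (hp0 :: hprest) 0 "")
      (PySem.Dict.ofList (PySem.List.pyGetD (kc0 :: kcrest) 0 [])))
      = pvStep (pvRender PySem.Dict.empty) (hp0, PySem.Dict.ofList kc0) := by
    simp [pvStep, pvRender, PySem.List.pyGetD_zero_cons]
    rfl
  rw [hstep0]
  have hdrop1 : (((hp0 :: hprest).zip (kc0 :: kcrest)).map
      (fun q => (q.1, PySem.Dict.ofList q.2))).drop 1
      = (hprest.zip kcrest).map (fun q => (q.1, PySem.Dict.ofList q.2)) := by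
    rw [hpairs]; rfl
  rw [hdrop1, hpairs]
  have hfold := pvFoldRender ((hp0, PySem.Dict.ofList kc0)
      :: (hprest.zip kcrest).map (fun q => (q.1, PySem.Dict.ofList q.2)))
    PySem.Dict.empty (by intro k ds h; simp [PySem.Dict.get?_empty] at h)
    ?_
  · exact congrArg PySem.Dict.items (by simpa only [List.foldl_cons] using hfold)
  · intro p hp
    rcases List.mem_cons.mp hp with h | h
    · subst h; exact PySem.Dict.nodup_keys_ofList _
    · obtain ⟨q, _, rfl⟩ := List.mem_map.mp h
      exact PySem.Dict.nodup_keys_ofList _
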